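-- pv_equiv track=rewrite | github.com/Unlim8ted-Studio-Productions/unlim8ted.com | tools/print_migration.py | split_pf_variant_name
-- ===== SOURCE A (Python) =====
-- from typing import Any, Dict, List, Optional, Tuple
--
-- def split_pf_variant_name(full: str) -> Tuple[str, str, str]:
--     """
--     "Life of a Meatball Unisex T-Shirt / White / XS" -> (product_name, color, size)
--     If it doesn't match, returns best-effort.
--     """
--     parts = [p.strip() for p in (full or "").split("/") if p.strip()]
--     if len(parts) >= 3:
--         return parts[0], parts[1], parts[2]
--     if len(parts) == 2:
--         return parts[0], parts[1], ""
--     if len(parts) == 1: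
--         return parts[0], "", ""
--     return "", "", ""
-- ===== SOURCE B (Python) =====
-- def split_pf_variant_name(full):
--     # Single left-to-right scan: a small state machine consumes one character at a
--     # time (with a '/' sentinel appended), stripping and dispatching segments on
--     # the fly instead of building a split/strip/filter list and branching on it.
--     name, color, size = "", "", ""
--     k = 0          # index of the next slot to fill
--     buf = ""       # current segment with leading whitespace already skipped
--     tail = 0       # length of buf up to its last non-whitespace character
--     for ch in (full or "") + "/":
--         if ch == "/":
--             if tail:
--                 if k == 0:
--                     name = buf[:tail]
--                 elif k == 1:
--                     color = buf[:tail]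
--                 elif k == 2:
--                     size = buf[:tail]
--                 k += 1
--             buf = ""
--             tail = 0
--         elif buf or not ch.isspace():
--             buf += ch
--             if not ch.isspace():
--                 tail = len(buf)
--     return (name, color, size)
-- ===== Notes on version B (the rewrite author's own statement) =====
-- stated objective: alternative
-- what changed: Replaced A's split('/')/strip/filter list construction plus four-way length-branch cascade with a single left-to-right character scan: a streaming state machine with a buffer and a last-non-space marker that strips segments in place and writes each nonempty segment directly into the next of the three result slots.
import Mathlib
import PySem

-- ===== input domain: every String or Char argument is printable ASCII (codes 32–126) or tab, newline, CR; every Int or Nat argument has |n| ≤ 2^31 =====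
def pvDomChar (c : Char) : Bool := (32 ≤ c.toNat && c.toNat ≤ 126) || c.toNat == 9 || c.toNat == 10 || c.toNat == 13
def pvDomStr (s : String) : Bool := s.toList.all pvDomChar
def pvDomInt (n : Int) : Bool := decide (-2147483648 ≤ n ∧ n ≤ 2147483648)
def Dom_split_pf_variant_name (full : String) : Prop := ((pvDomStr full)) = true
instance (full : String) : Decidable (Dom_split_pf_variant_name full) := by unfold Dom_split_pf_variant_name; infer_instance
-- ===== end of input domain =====

-- B replaces A's split/strip/filter list plus length-branch cascade with a single
-- left-to-right character scan (a streaming state machine that strips and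
-- dispatches segments on the fly); objective: alternative decomposition, same cost.


-- ===== PORT A =====
-- '(full or "").split("/")': split? is none only for an empty separator, never here, so getD [] is exact.
def split_pf_variant_name (full : String) : String × String × String :=
  let parts := (((PySem.Str.split? full "/").getD []).map PySem.Str.strip).filter (fun p => p ≠ "")
  if parts.length ≥ 3 then
    ((PySem.List.pyGet? parts 0).getD "", (PySem.List.pyGet? parts 1).getD "",
     (PySem.List.pyGet? parts 2).getD "")
  else if parts.length = 2 then
    ((PySem.List.pyGet? parts 0).getD "", (PySem.List.pyGet? parts 1).getD "", "")
  else if parts.length = 1 then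
    ((PySem.List.pyGet? parts 0).getD "", "", "")
  else ("", "", "")

-- ===== PORT B =====
-- One step of Source B's loop body; the Python strs name/color/size/buf are carried as List Char.
def pvAltStep : ((List Char × List Char × List Char) × Nat × List Char × Nat) → Char →
    ((List Char × List Char × List Char) × Nat × List Char × Nat)
  | ((n, c, s), k, buf, tail), ch =>
    if ch = '/' then
      if tail ≠ 0 then
        ((if k = 0 then (buf.take tail, c, s)
          else if k = 1 then (n, buf.take tail, s)
          else if k = 2 then (n, c, buf.take tail)
          else (n, c, s)), k + 1, [], 0)
      else ((n, c, s), k, [], 0)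
    else if !buf.isEmpty || !(PySem.Chars.isspace ch) then
      ((n, c, s), k, buf ++ [ch], if PySem.Chars.isspace ch then tail else (buf ++ [ch]).length)
    else ((n, c, s), k, buf, tail)

def split_pf_variant_name_alt (full : String) : String × String × String :=
  let r := (full.toList ++ ['/']).foldl pvAltStep (([], [], []), 0, [], 0)
  (String.ofList r.1.1, String.ofList r.1.2.1, String.ofList r.1.2.2)

-- ===== PRECONDITION & SPEC =====
def Spec_split_pf_variant_name (full : String) (out : String × String × String) : Prop :=
  out = split_pf_variant_name_alt full
instance (full : String) (out : String × String × String) : Decidable (Spec_split_pf_variant_name full out) := by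
  unfold Spec_split_pf_variant_name; infer_instance

-- ===== CLAIM =====
def Claim_equal_split_pf_variant_name : Prop :=
  ∀ (full : String), Dom_split_pf_variant_name full → Spec_split_pf_variant_name full (split_pf_variant_name full)

-- ===== LEMMAS AND PROOFS =====

-- Simple structural split on '/' (spec for PySem.Chars.splitOn with a one-char separator).
def pvSAux : List Char → List Char → List (List Char)
  | [], cur => [cur.reverse]
  | c :: rest, cur => if c = '/' then cur.reverse :: pvSAux rest [] else pvSAux rest (c :: cur)

def pvSegs (l : List Char) : List (List Char) :=
  ((pvSAux l []).map PySem.Chars.strip).filter (fun g => decide (g ≠ []))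

def pvApply : (List Char × List Char × List Char) → Nat → List (List Char) →
    (List Char × List Char × List Char)
  | f, _, [] => f
  | (n, c, s), k, g :: gs =>
    pvApply (if k = 0 then (g, c, s) else if k = 1 then (n, g, s) else if k = 2 then (n, c, g)
             else (n, c, s)) (k + 1) gs

theorem pv_go_eq (fuel : Nat) : ∀ (l cur : List Char) (acc : List (List Char)),
    l.length < fuel →
    PySem.Chars.splitOn.go ['/'] fuel l cur acc = acc.reverse ++ pvSAux l cur := by
  induction fuel with
  | zero => intro l cur acc h; omega
  | succ fuel ih =>
    intro l cur acc h
    cases l with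
    | nil => simp [PySem.Chars.splitOn.go, pvSAux]
    | cons c rest =>
      by_cases hc : c = '/'
      · subst hc
        simp only [PySem.Chars.splitOn.go, List.isPrefixOf, BEq.rfl,
          List.length_cons, List.length_nil, Nat.zero_add, List.drop_succ_cons, List.drop_zero]
        rw [ih rest [] (cur.reverse :: acc) (by simp at h; omega)]
        simp [pvSAux]
      · simp only [PySem.Chars.splitOn.go, List.isPrefixOf]
        rw [if_neg (by simp [hc, BEq.symm_false])]
        rw [ih rest (c :: cur) acc (by simp at h; omega)]
        simp [pvSAux, hc]

theorem pv_splitOn_eq (l : List Char) : PySem.Chars.splitOn l ['/'] = pvSAux l [] := by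
  have := pv_go_eq (l.length + 1) l [] [] (by omega)
  simpa [PySem.Chars.splitOn] using this

theorem pv_sAux_no_slash : ∀ (p cur : List Char), '/' ∉ p → pvSAux p cur = [cur.reverse ++ p] := by
  intro p
  induction p with
  | nil => intro cur _; simp [pvSAux]
  | cons c rest ih =>
    intro cur h
    have hc : c ≠ '/' := fun hc => h (by simp [hc])
    simp only [pvSAux, if_neg hc]
    rw [ih (c :: cur) (fun hm => h (by simp [hm]))]
    simp

theorem pv_sAux_append : ∀ (p rest cur : List Char), '/' ∉ p →
    pvSAux (p ++ '/' :: rest) cur = (cur.reverse ++ p) :: pvSAux rest [] := by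
  intro p
  induction p with
  | nil => intro rest cur _; simp [pvSAux]
  | cons c p' ih =>
    intro rest cur h
    have hc : c ≠ '/' := fun hc => h (by simp [hc])
    simp only [List.cons_append, pvSAux, if_neg hc]
    rw [ih rest (c :: cur) (fun hm => h (by simp [hm]))]
    simp

theorem pv_apply_append (gs1 : List (List Char)) :
    ∀ (f : List Char × List Char × List Char) (k : Nat) (gs2 : List (List Char)),
    pvApply f k (gs1 ++ gs2) = pvApply (pvApply f k gs1) (k + gs1.length) gs2 := by
  induction gs1 with
  | nil => intro f k gs2; simp [pvApply]
  | cons g gs ih =>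
    intro f k gs2
    obtain ⟨n, c, s⟩ := f
    simp only [List.cons_append, pvApply]
    rw [ih]
    simp [Nat.add_assoc, Nat.add_comm 1 gs.length]

theorem pv_lstrip_snoc_nonspace (p : List Char) (c : Char) (h : PySem.Chars.isspace c = false) :
    PySem.Chars.lstrip (p ++ [c]) = PySem.Chars.lstrip p ++ [c] := by
  simp only [PySem.Chars.lstrip, List.dropWhile_append]
  split_ifs with he
  · simp_all [List.isEmpty_iff]
  · rfl

theorem pv_lstrip_snoc_space (p : List Char) (c : Char) (h : PySem.Chars.isspace c = true) :
    PySem.Chars.lstrip (p ++ [c]) =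
      if PySem.Chars.lstrip p = [] then [] else PySem.Chars.lstrip p ++ [c] := by
  simp only [PySem.Chars.lstrip, List.dropWhile_append]
  split_ifs with he h2
  · simp [h]
  · simp_all [List.isEmpty_iff]
  · simp_all
  · rfl

theorem pv_rstrip_snoc_nonspace (xs : List Char) (c : Char) (h : PySem.Chars.isspace c = false) :
    PySem.Chars.rstrip (xs ++ [c]) = xs ++ [c] := by
  simp [PySem.Chars.rstrip, h]

theorem pv_strip_snoc_nonspace (p : List Char) (c : Char) (h : PySem.Chars.isspace c = false) :
    PySem.Chars.strip (p ++ [c]) = PySem.Chars.lstrip p ++ [c] := by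
  simp only [PySem.Chars.strip, pv_lstrip_snoc_nonspace p c h, pv_rstrip_snoc_nonspace _ c h]

theorem pv_strip_snoc_space (p : List Char) (c : Char) (h : PySem.Chars.isspace c = true) :
    PySem.Chars.strip (p ++ [c]) = PySem.Chars.strip p := by
  simp only [PySem.Chars.strip, pv_lstrip_snoc_space p c h]
  split_ifs with he
  · simp [he, PySem.Chars.rstrip]
  · simp [PySem.Chars.rstrip, h]

theorem pv_take_strip (p : List Char) :
    (PySem.Chars.lstrip p).take (PySem.Chars.strip p).length = PySem.Chars.strip p := by
  have hpre : PySem.Chars.strip p <+: PySem.Chars.lstrip p := by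
    have hs : List.dropWhile PySem.Chars.isspace (PySem.Chars.lstrip p).reverse <:+
        (PySem.Chars.lstrip p).reverse := List.dropWhile_suffix _
    rw [← List.reverse_suffix]
    simpa [PySem.Chars.strip, PySem.Chars.rstrip] using hs
  exact (List.prefix_iff_eq_take.mp hpre).symm

theorem pv_step_char (f : List Char × List Char × List Char) (k : Nat) (p : List Char)
    (c : Char) (hc : c ≠ '/') :
    pvAltStep (f, k, PySem.Chars.lstrip p, (PySem.Chars.strip p).length) c =
      (f, k, PySem.Chars.lstrip (p ++ [c]), (PySem.Chars.strip (p ++ [c])).length) := by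
  obtain ⟨n, cl, s⟩ := f
  by_cases hs : PySem.Chars.isspace c = true
  · by_cases he : PySem.Chars.lstrip p = []
    · have hstrip : PySem.Chars.strip p = [] := by simp [PySem.Chars.strip, he, PySem.Chars.rstrip]
      simp [pvAltStep, hc, pv_lstrip_snoc_space p c hs, pv_strip_snoc_space p c hs, he, hs, hstrip]
    · simp [pvAltStep, hc, pv_lstrip_snoc_space p c hs, pv_strip_snoc_space p c hs, he, hs]
  · have hs' : PySem.Chars.isspace c = false := by simpa using hs
    have hlen : (PySem.Chars.strip (p ++ [c])).length = (PySem.Chars.lstrip p ++ [c]).length := by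
      rw [pv_strip_snoc_nonspace p c hs']
    simp [pvAltStep, hc, pv_lstrip_snoc_nonspace p c hs', hs', hlen]

theorem pv_step_slash (f : List Char × List Char × List Char) (k : Nat) (p : List Char) :
    pvAltStep (f, k, PySem.Chars.lstrip p, (PySem.Chars.strip p).length) '/' =
      (pvApply f k (([PySem.Chars.strip p]).filter (fun g => decide (g ≠ []))),
       k + (([PySem.Chars.strip p]).filter (fun g => decide (g ≠ []))).length, [], 0) := by
  obtain ⟨n, cl, s⟩ := f
  by_cases he : PySem.Chars.strip p = []
  · simp [pvAltStep, he, pvApply]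
  · have hlen : (PySem.Chars.strip p).length ≠ 0 := by simpa using he
    simp only [pvAltStep, if_true, if_pos hlen, pv_take_strip p]
    simp [he, pvApply]

theorem pv_segs_no_slash (p : List Char) (h : '/' ∉ p) :
    pvSegs p = ([PySem.Chars.strip p]).filter (fun g => decide (g ≠ [])) := by
  simp [pvSegs, pv_sAux_no_slash p [] h]

theorem pv_segs_split (p rest : List Char) (h : '/' ∉ p) :
    pvSegs (p ++ '/' :: rest) =
      (([PySem.Chars.strip p]).filter (fun g => decide (g ≠ []))) ++ pvSegs rest := by
  simp only [pvSegs, pv_sAux_append p rest [] h, List.reverse_nil, List.nil_append, List.map_cons]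
  rw [show (PySem.Chars.strip p :: List.map PySem.Chars.strip (pvSAux rest [])) =
      [PySem.Chars.strip p] ++ List.map PySem.Chars.strip (pvSAux rest []) from rfl,
    List.filter_append]

theorem pv_inv : ∀ (cs p : List Char) (f : List Char × List Char × List Char) (k : Nat),
    '/' ∉ p →
    (cs ++ ['/']).foldl pvAltStep (f, k, PySem.Chars.lstrip p, (PySem.Chars.strip p).length) =
      (pvApply f k (pvSegs (p ++ cs)), k + (pvSegs (p ++ cs)).length, [], 0) := by
  intro cs
  induction cs with
  | nil =>
    intro p f k h
    simp only [List.nil_append, List.append_nil, List.foldl_cons, List.foldl_nil]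
    rw [pv_step_slash f k p, pv_segs_no_slash p h]
  | cons ch cs' ih =>
    intro p f k h
    by_cases hc : ch = '/'
    · subst hc
      simp only [List.cons_append, List.foldl_cons]
      rw [pv_step_slash f k p]
      have hih := ih [] (pvApply f k (([PySem.Chars.strip p]).filter (fun g => decide (g ≠ []))))
        (k + (([PySem.Chars.strip p]).filter (fun g => decide (g ≠ []))).length) (by simp)
      simp only [show PySem.Chars.lstrip [] = [] from rfl,
        show (PySem.Chars.strip []).length = 0 from rfl, List.nil_append] at hih
      rw [hih, pv_segs_split p cs' h, pv_apply_append]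
      simp [Nat.add_assoc]
    · simp only [List.cons_append, List.foldl_cons]
      rw [pv_step_char f k p ch hc]
      rw [ih (p ++ [ch]) f k (by simp [h, hc, Ne.symm])]
      simp
  
theorem pv_apply_ge (gs : List (List Char)) :
    ∀ (f : List Char × List Char × List Char) (k : Nat), 3 ≤ k → pvApply f k gs = f := by
  induction gs with
  | nil => intro f k _; rfl
  | cons g gs ih =>
    intro f k h
    obtain ⟨n, c, s⟩ := f
    have h0 : k ≠ 0 := by omega
    have h1 : k ≠ 1 := by omega
    have h2 : k ≠ 2 := by omega
    simp only [pvApply, if_neg h0, if_neg h1, if_neg h2]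
    exact ih _ _ (by omega)

theorem pv_apply_zero (gs : List (List Char)) :
    pvApply ([], [], []) 0 gs = (gs.getD 0 [], gs.getD 1 [], gs.getD 2 []) := by
  rcases gs with _ | ⟨a, _ | ⟨b, _ | ⟨c, t⟩⟩⟩
  · rfl
  · simp [pvApply]
  · simp [pvApply]
  · simp [pvApply, pv_apply_ge]

theorem pv_ofList_ne_empty (l : List Char) : (String.ofList l ≠ "") ↔ l ≠ [] := by
  constructor
  · intro h hl; exact h (by simp [hl])
  · intro h he
    apply h
    have := congrArg String.toList he
    simpa using this

theorem pv_strip_ofList (l : List Char) :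
    PySem.Str.strip (String.ofList l) = String.ofList (PySem.Chars.strip l) := by
  simp [PySem.Str.strip]

theorem pv_parts_eq (full : String) :
    (((PySem.Str.split? full "/").getD []).map PySem.Str.strip).filter (fun p => p ≠ "") =
      (pvSegs full.toList).map String.ofList := by
  have hsep : ("/" : String).toList = ['/'] := by decide
  simp only [PySem.Str.split?, hsep, PySem.Chars.split?]
  simp only [List.isEmpty_cons, Bool.false_eq_true, if_false, Option.map_some, Option.getD_some]
  rw [pv_splitOn_eq]
  simp only [List.map_map]
  have hmap : (PySem.Str.strip ∘ String.ofList) = (String.ofList ∘ PySem.Chars.strip) := by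
    funext l; simp [pv_strip_ofList]
  rw [hmap, ← List.map_map, List.filter_map]
  simp only [pvSegs, List.filter_map]
  have hp : ((fun p => decide (p ≠ "")) ∘ String.ofList) = (fun g : List Char => decide (g ≠ [])) := by
    funext g
    rw [Function.comp_apply, decide_eq_decide]
    exact pv_ofList_ne_empty g
  rw [hp]

theorem pv_branch (gs : List (List Char)) :
    (let parts := gs.map String.ofList
     if parts.length ≥ 3 then
       ((PySem.List.pyGet? parts 0).getD "", (PySem.List.pyGet? parts 1).getD "",
        (PySem.List.pyGet? parts 2).getD "")
     else if parts.length = 2 then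
       ((PySem.List.pyGet? parts 0).getD "", (PySem.List.pyGet? parts 1).getD "", "")
     else if parts.length = 1 then
       ((PySem.List.pyGet? parts 0).getD "", "", "")
     else ("", "", "")) =
    (String.ofList (gs.getD 0 []), String.ofList (gs.getD 1 []), String.ofList (gs.getD 2 [])) := by
  rcases gs with _ | ⟨a, _ | ⟨b, _ | ⟨c, t⟩⟩⟩
  · simp
  · simp [PySem.List.pyGet?, PySem.List.pyIdx?]
  · simp [PySem.List.pyGet?, PySem.List.pyIdx?]
  · have h1 := PySem.List.pyGet?_ofNat (xs := (a :: b :: c :: t).map String.ofList) (n := 1) (by simp)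
    have h2 := PySem.List.pyGet?_ofNat (xs := (a :: b :: c :: t).map String.ofList) (n := 2) (by simp)
    simp at h1 h2
    simp [h1, h2]

-- ===== VERDICT =====
theorem split_pf_variant_name_spec : Claim_equal_split_pf_variant_name := by
  intro full _
  unfold Spec_split_pf_variant_name split_pf_variant_name split_pf_variant_name_alt
  rw [pv_parts_eq full]
  have hb := pv_branch (pvSegs full.toList)
  simp only at hb
  rw [hb]
  have hi := pv_inv full.toList [] ([], [], []) 0 (by simp)
  simp only [show PySem.Chars.lstrip [] = [] from rfl,
    show (PySem.Chars.strip []).length = 0 from rfl, List.nil_append] at hi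
  rw [hi, pv_apply_zero]
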